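-- pv_equiv track=rewrite | github.com/danroblewis/nrf5340-app | generate_ble_docs.py | parse_ble_flags
-- ===== SOURCE A (Python) =====
-- from typing import Dict, List, Tuple, Optional
--
-- def parse_ble_flags(flags_str: str) -> List[str]:
--     """Parse BLE flags like BT_GATT_CHRC_READ | BT_GATT_CHRC_WRITE."""
--     flags = []
--     flag_parts = flags_str.split('|')
--
--     for part in flag_parts:
--         part = part.strip()
--         if 'READ' in part:
--             flags.append('READ')
--         elif 'WRITE_WITHOUT_RESP' in part:
--             flags.append('WRITE_WITHOUT_RESP')
--         elif 'WRITE' in part: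
--             flags.append('WRITE')
--         elif 'NOTIFY' in part:
--             flags.append('NOTIFY')
--         elif 'INDICATE' in part:
--             flags.append('INDICATE')
--
--     return flags
-- ===== SOURCE B (Python) =====
-- def _classify(part):
--     """First flag named in part, by A's priority (WRITE_WITHOUT_RESP before WRITE)."""
--     if 'READ' in part:
--         return 'READ'
--     if 'WRITE' in part:
--         return 'WRITE_WITHOUT_RESP' if 'WRITE_WITHOUT_RESP' in part else 'WRITE'
--     if 'NOTIFY' in part:
--         return 'NOTIFY'
--     if 'INDICATE' in part:
--         return 'INDICATE'
--     return None
--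
-- def parse_ble_flags(flags_str):
--     """Parse BLE flags like BT_GATT_CHRC_READ | BT_GATT_CHRC_WRITE."""
--     flags = []
--     seg = []
--     for ch in flags_str:
--         if ch == '|':
--             name = _classify(''.join(seg).strip())
--             if name is not None:
--                 flags.append(name)
--             seg = []
--         else:
--             seg.append(ch)
--     name = _classify(''.join(seg).strip())
--     if name is not None:
--         flags.append(name)
--     return flags
-- ===== Notes on version B (the rewrite author's own statement) =====
-- stated objective: alternative
-- what changed: Replaces A's split-on-separator + strip + five-way if/elif ladder over parts by a single character-level pass with an explicit segment buffer (no split call) and a 4-test nested decision tree that exploits WRITE being a prefix of WRITE_WITHOUT_RESP.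
import Mathlib
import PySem

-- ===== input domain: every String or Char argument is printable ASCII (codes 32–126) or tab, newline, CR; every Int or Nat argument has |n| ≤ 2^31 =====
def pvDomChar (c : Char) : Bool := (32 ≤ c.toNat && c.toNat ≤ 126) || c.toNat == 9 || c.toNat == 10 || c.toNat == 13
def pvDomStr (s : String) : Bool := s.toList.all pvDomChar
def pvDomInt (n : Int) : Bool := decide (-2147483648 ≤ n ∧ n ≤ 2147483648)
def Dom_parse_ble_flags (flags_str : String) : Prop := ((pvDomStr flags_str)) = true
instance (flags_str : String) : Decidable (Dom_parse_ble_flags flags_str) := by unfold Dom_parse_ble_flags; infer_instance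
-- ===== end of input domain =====

-- B replaces A's split+strip+five-way if/elif ladder by one character-level pass with an
-- explicit segment buffer and a 4-test nested decision tree (alternative structure, same cost).

-- ===== PORT A =====
def parse_ble_flags (flags_str : String) : List String :=
  ((PySem.Str.split? flags_str "|").getD []).foldl (fun flags part0 =>
    let part := PySem.Str.strip part0
    if PySem.Str.isIn "READ" part then flags ++ ["READ"]
    else if PySem.Str.isIn "WRITE_WITHOUT_RESP" part then flags ++ ["WRITE_WITHOUT_RESP"]
    else if PySem.Str.isIn "WRITE" part then flags ++ ["WRITE"]
    else if PySem.Str.isIn "NOTIFY" part then flags ++ ["NOTIFY"]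
    else if PySem.Str.isIn "INDICATE" part then flags ++ ["INDICATE"]
    else flags) []

-- ===== PORT B =====
-- _classify from Source B: nested decision tree, 'WRITE' checked once, longer name refined inside.
def pvClassify (part : String) : Option String :=
  if PySem.Str.isIn "READ" part then some "READ"
  else if PySem.Str.isIn "WRITE" part then
    some (if PySem.Str.isIn "WRITE_WITHOUT_RESP" part then "WRITE_WITHOUT_RESP" else "WRITE")
  else if PySem.Str.isIn "NOTIFY" part then some "NOTIFY"
  else if PySem.Str.isIn "INDICATE" part then some "INDICATE"
  else none

-- single pass over the characters; state = (flags so far, current segment buffer)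
def parse_ble_flags_alt (flags_str : String) : List String :=
  let fin := flags_str.toList.foldl
    (fun (st : List String × List Char) ch =>
      if ch = '|' then
        (st.1 ++ (pvClassify (PySem.Str.strip (String.ofList st.2))).toList, [])
      else (st.1, st.2 ++ [ch])) ([], [])
  fin.1 ++ (pvClassify (PySem.Str.strip (String.ofList fin.2))).toList

-- ===== PRECONDITION & SPEC =====
def Spec_parse_ble_flags (flags_str : String) (out : List String) : Prop := out = parse_ble_flags_alt flags_str
instance (flags_str : String) (out : List String) : Decidable (Spec_parse_ble_flags flags_str out) := by unfold Spec_parse_ble_flags; infer_instance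

-- ===== CLAIM (what is proved, stated in full; the proofs are below) =====
def Claim_equal_parse_ble_flags : Prop := ∀ (flags_str : String), Dom_parse_ble_flags flags_str → Spec_parse_ble_flags flags_str (parse_ble_flags flags_str)

-- ===== LEMMAS AND PROOFS =====

-- reference splitter on char lists: split on '|'
def pvSplit : List Char → List (List Char)
  | [] => [[]]
  | c :: rest => if c = '|' then [] :: pvSplit rest else (pvSplit rest).modifyHead (c :: ·)

lemma pvSplit_ne_nil (l : List Char) : pvSplit l ≠ [] := by
  induction l with
  | nil => simp [pvSplit]
  | cons c rest ih =>
    simp only [pvSplit]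
    split_ifs
    · simp
    · cases h : pvSplit rest
      · exact absurd h ih
      · simp [List.modifyHead]

-- 'WRITE' occurs wherever 'WRITE_WITHOUT_RESP' does
lemma pv_write_mono (p : List Char)
    (h : PySem.Chars.isIn ['W','R','I','T','E','_','W','I','T','H','O','U','T','_','R','E','S','P'] p = true) :
    PySem.Chars.isIn ['W','R','I','T','E'] p = true := by
  rw [PySem.Chars.isIn_iff_infix] at h ⊢
  exact List.IsInfix.trans (by decide) h

-- A's branch ladder on one part appends exactly B's classification of that part
lemma pv_step_eq (flags : List String) (part : String) :
    (if PySem.Str.isIn "READ" part then flags ++ ["READ"]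
     else if PySem.Str.isIn "WRITE_WITHOUT_RESP" part then flags ++ ["WRITE_WITHOUT_RESP"]
     else if PySem.Str.isIn "WRITE" part then flags ++ ["WRITE"]
     else if PySem.Str.isIn "NOTIFY" part then flags ++ ["NOTIFY"]
     else if PySem.Str.isIn "INDICATE" part then flags ++ ["INDICATE"]
     else flags)
    = flags ++ (pvClassify part).toList := by
  have hkey := pv_write_mono part.toList
  unfold pvClassify
  split_ifs <;> simp_all

-- A's whole fold over the parts list, with pv_step_eq applied
lemma pv_foldA_eq (l : List String) (acc : List String) :
    l.foldl (fun flags part0 =>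
      let part := PySem.Str.strip part0
      if PySem.Str.isIn "READ" part then flags ++ ["READ"]
      else if PySem.Str.isIn "WRITE_WITHOUT_RESP" part then flags ++ ["WRITE_WITHOUT_RESP"]
      else if PySem.Str.isIn "WRITE" part then flags ++ ["WRITE"]
      else if PySem.Str.isIn "NOTIFY" part then flags ++ ["NOTIFY"]
      else if PySem.Str.isIn "INDICATE" part then flags ++ ["INDICATE"]
      else flags) acc
    = acc ++ l.filterMap (fun part0 => pvClassify (PySem.Str.strip part0)) := by
  induction l generalizing acc with
  | nil => simp
  | cons x xs ih =>
    simp only [List.foldl_cons, List.filterMap_cons, ih]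
    rw [pv_step_eq]
    cases pvClassify (PySem.Str.strip x) <;> simp

-- PySem's fueled splitter on separator "|" is pvSplit
lemma pv_go_eq (f : Nat) (l cur : List Char) (acc : List (List Char)) (hf : l.length ≤ f) :
    PySem.Chars.splitOn.go ['|'] f l cur acc
    = acc.reverse ++ (pvSplit l).modifyHead (cur.reverse ++ ·) := by
  induction f generalizing l cur acc with
  | zero =>
    have : l = [] := by cases l <;> simp_all
    subst this
    simp [PySem.Chars.splitOn.go, pvSplit, List.modifyHead]
  | succ f ih =>
    cases l with
    | nil => simp [PySem.Chars.splitOn.go, pvSplit, List.modifyHead]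
    | cons c rest =>
      simp only [PySem.Chars.splitOn.go]
      by_cases hc : c = '|'
      · subst hc
        rw [if_pos (by simp [List.isPrefixOf])]
        rw [show List.drop (['|'] : List Char).length ('|' :: rest) = rest from rfl]
        rw [ih rest [] (List.reverse cur :: acc) (by simpa using Nat.le_of_succ_le_succ hf)]
        simp only [pvSplit, List.modifyHead, List.reverse_cons,
          List.append_assoc, List.singleton_append]
        cases pvSplit rest <;> simp
      · rw [if_neg (by simp [List.isPrefixOf]; exact fun h => hc h.symm)]
        rw [ih rest (c :: cur) acc (by simpa using Nat.le_of_succ_le_succ hf)]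
        simp only [pvSplit, if_neg hc, List.modifyHead_modifyHead, List.reverse_cons]
        have hfun : (fun x => cur.reverse ++ [c] ++ x)
            = ((fun x => cur.reverse ++ x) ∘ fun x => (c :: x : List Char)) := by
          funext x; simp
        rw [hfun]

lemma pv_splitOn_eq (l : List Char) : PySem.Chars.splitOn l ['|'] = pvSplit l := by
  unfold PySem.Chars.splitOn
  rw [pv_go_eq _ _ _ _ (by omega)]
  cases h : pvSplit l with
  | nil => exact absurd h (pvSplit_ne_nil l)
  | cons s ss => simp [List.modifyHead]

-- A's parts are pvSplit of the character list (as Strings)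
lemma pv_partsA (s : String) :
    (PySem.Str.split? s "|").getD [] = (pvSplit s.toList).map String.ofList := by
  have h := PySem.Str.split?_map s "|"
  have h2 : PySem.Chars.split? s.toList ['|'] = some (pvSplit s.toList) := by
    rw [PySem.Chars.split?]
    simp [pv_splitOn_eq]
  rw [show ("|" : String).toList = ['|'] from rfl, h2] at h
  cases hs : PySem.Str.split? s "|" with
  | none => rw [hs] at h; simp at h
  | some ps =>
    rw [hs] at h
    simp only [Option.map_some] at h
    injection h with h
    simp only [Option.getD_some]
    rw [← h, List.map_map]
    simp [Function.comp_def, String.ofList_toList]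

-- B's char-level fold equals the filterMap over pvSplit, with seg prepended to the head segment
lemma pv_foldB_eq (l : List Char) (flags : List String) (seg : List Char) :
    (let fin := l.foldl
      (fun (st : List String × List Char) ch =>
        if ch = '|' then
          (st.1 ++ (pvClassify (PySem.Str.strip (String.ofList st.2))).toList, [])
        else (st.1, st.2 ++ [ch])) (flags, seg)
     fin.1 ++ (pvClassify (PySem.Str.strip (String.ofList fin.2))).toList)
    = flags ++ ((pvSplit l).modifyHead (seg ++ ·)).filterMap
        (fun cs => pvClassify (PySem.Str.strip (String.ofList cs))) := by
  induction l generalizing flags seg with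
  | nil =>
    simp only [List.foldl_nil, pvSplit, List.modifyHead, List.filterMap_cons, List.filterMap_nil]
    cases h : pvClassify (PySem.Str.strip (String.ofList seg)) <;> simp [h]
  | cons c rest ih =>
    by_cases hc : c = '|'
    · subst hc
      simp only [List.foldl_cons, if_true, ite_true]
      rw [ih]
      simp only [pvSplit, List.modifyHead]
      cases h : pvClassify (PySem.Str.strip (String.ofList seg)) with
      | none =>
        cases hr : pvSplit rest with
        | nil => exact absurd hr (pvSplit_ne_nil rest)
        | cons s ss => simp [h, List.filterMap_cons]
      | some k =>
        cases hr : pvSplit rest with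
        | nil => exact absurd hr (pvSplit_ne_nil rest)
        | cons s ss => simp [h, List.filterMap_cons]
    · simp only [List.foldl_cons, if_neg hc]
      rw [ih]
      simp only [pvSplit, if_neg hc, List.modifyHead_modifyHead]
      cases hr : pvSplit rest with
      | nil => exact absurd hr (pvSplit_ne_nil rest)
      | cons s ss => simp [List.modifyHead, List.filterMap_cons]

-- ===== VERDICT (by name: the statement is the Claim_ definition above) =====
set_option maxHeartbeats 1600000 in
theorem parse_ble_flags_spec : Claim_equal_parse_ble_flags := by
  intro s _
  unfold Spec_parse_ble_flags parse_ble_flags parse_ble_flags_alt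
  rw [pv_partsA, pv_foldA_eq, List.filterMap_map, pv_foldB_eq]
  cases h : pvSplit s.toList with
  | nil => exact absurd h (pvSplit_ne_nil s.toList)
  | cons a as =>
    simp only [List.nil_append, List.modifyHead_cons]
    have hfun : ((fun part0 => pvClassify (PySem.Str.strip part0)) ∘ String.ofList)
        = (fun cs => pvClassify (PySem.Str.strip (String.ofList cs))) := rfl
    rw [hfun]
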